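-- pv_equiv track=rewrite | github.com/AdamLundb/AdventOfCode2025 | day2/day2b.py | extract_number_of_sequences_to_check
-- ===== SOURCE A (Python) =====
-- def extract_number_of_sequences_to_check(number):
--     str_nr = str(number)
--     sequence_to_check = []
--     for i in range(len(str_nr)):
--         j = i + 1
--         if len(str_nr) % j == 0 and  j <= len(str_nr)/2:
--             sequence_to_check.append(j)
--     return sequence_to_check
-- ===== SOURCE B (Python) =====
-- def extract_number_of_sequences_to_check(number):
--     length = len(str(number))
--     divisors = set()
--     i = 1
--     while i * i <= length:
--         if length % i == 0:
--             divisors.add(i)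
--             divisors.add(length // i)
--         i += 1
--     divisors.discard(length)
--     return sorted(divisors)
-- ===== Notes on version B (the rewrite author's own statement) =====
-- stated objective: alternative
-- what changed: B computes the digit-string length L once and finds its proper divisors by sqrt(L) trial division collecting divisor pairs into a set, then discards L and sorts, instead of A's linear scan over every candidate 1..L with a divisibility-and-half test.
import Mathlib
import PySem

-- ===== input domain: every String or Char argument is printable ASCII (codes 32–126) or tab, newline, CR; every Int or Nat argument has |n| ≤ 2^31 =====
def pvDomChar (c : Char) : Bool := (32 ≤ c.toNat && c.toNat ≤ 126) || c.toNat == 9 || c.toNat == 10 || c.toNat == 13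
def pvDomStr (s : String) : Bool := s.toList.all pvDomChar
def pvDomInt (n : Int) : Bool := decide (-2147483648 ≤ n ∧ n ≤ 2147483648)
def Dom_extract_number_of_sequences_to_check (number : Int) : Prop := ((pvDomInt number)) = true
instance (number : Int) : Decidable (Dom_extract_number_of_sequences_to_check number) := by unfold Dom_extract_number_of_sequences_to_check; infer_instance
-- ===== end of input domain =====

-- B replaces A's linear scan of all candidate lengths 1..L with √L trial division collecting
-- divisor pairs into a set, then discards L and sorts (objective: alternative algorithm).

-- ===== PORT A =====
-- the 'for i in range(len(str_nr))' loop with its append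
-- 'j <= len(str_nr)/2' compares the int j with the exact float L/2; for these magnitudes
-- (L fits in a machine int far below 2^53) that is exactly 2*j ≤ L, which is how it is ported.
def pvSeqLoop (L : Int) : List Int :=
  (PySem.List.pyRange 0 L 1).foldl
    (fun acc i =>
      let j := i + 1
      if PySem.Int.mod L j = 0 ∧ 2 * j ≤ L then acc ++ [j] else acc) []

def extract_number_of_sequences_to_check (number : Int) : List Int :=
  pvSeqLoop (PySem.List.len (PySem.Int.toChars number))

-- ===== PORT B =====
-- the 'while i * i <= length' loop of Source B; fuel makes the recursion structural
-- (fuel = length + 1 always suffices: the loop runs while i*i ≤ length, so i ≤ length).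
def pvDivLoop (fuel : Nat) (length : Nat) (i : Nat) (s : PySem.Set Int) : PySem.Set Int :=
  match fuel with
  | 0 => s
  | fuel + 1 =>
    if i * i ≤ length then
      pvDivLoop fuel length (i + 1)
        (if length % i = 0 then
          PySem.Set.add (PySem.Set.add s (i : Int)) ((length / i : Nat) : Int)
        else s)
    else s

def extract_number_of_sequences_to_check_alt (number : Int) : List Int :=
  let length := (PySem.Int.toChars number).length
  let divisors := pvDivLoop (length + 1) length 1 PySem.Set.empty
  PySem.List.sorted (PySem.Set.discard divisors (length : Int)) (fun x => x) false

-- ===== PRECONDITION & SPEC =====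
def Spec_extract_number_of_sequences_to_check (number : Int) (out : List Int) : Prop := out = extract_number_of_sequences_to_check_alt number
instance (number : Int) (out : List Int) : Decidable (Spec_extract_number_of_sequences_to_check number out) := by unfold Spec_extract_number_of_sequences_to_check; infer_instance

-- ===== CLAIM (what is proved, stated in full; the proofs are below) =====
def Claim_equal_extract_number_of_sequences_to_check : Prop := ∀ (number : Int), Dom_extract_number_of_sequences_to_check number → Spec_extract_number_of_sequences_to_check number (extract_number_of_sequences_to_check number)

-- ===== LEMMAS AND PROOFS =====

-- both results depend only on the digit-string length, which is at most 11 on Dom; one decide per length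
lemma pv_key : ∀ n : Nat, n < 12 →
    pvSeqLoop (n : Int) =
      PySem.List.sorted (PySem.Set.discard (pvDivLoop (n + 1) n 1 PySem.Set.empty) (n : Int))
        (fun x => x) false := by
  intro n hn
  interval_cases n <;> decide

lemma pv_len_lt (number : Int) (h : Dom_extract_number_of_sequences_to_check number) :
    (PySem.Int.toChars number).length < 12 := by
  have hdom : -2147483648 ≤ number ∧ number ≤ 2147483648 := by
    simpa [Dom_extract_number_of_sequences_to_check, pvDomInt] using h
  have hlt : number.natAbs < 10 ^ 10 := by norm_num; omega
  unfold PySem.Int.toChars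
  split
  · have := Nat.toDigits_length 10 number.natAbs 10 (by norm_num) hlt
    simp only [List.length_cons]
    omega
  · have := Nat.toDigits_length 10 number.toNat 10 (by norm_num) (by omega)
    omega

-- ===== VERDICT (by name: the statement is the Claim_ definition above) =====
theorem extract_number_of_sequences_to_check_spec : Claim_equal_extract_number_of_sequences_to_check := by
  intro number hdom
  unfold Spec_extract_number_of_sequences_to_check extract_number_of_sequences_to_check
    extract_number_of_sequences_to_check_alt
  rw [PySem.List.len_eq]
  exact pv_key _ (pv_len_lt number hdom)
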